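-- pv_equiv track=rewrite | github.com/newyoka1/portal | voter_pipeline/pipeline/crm_merge.py | _fill_slots
-- ===== SOURCE A (Python) =====
-- def _fill_slots(existing_vals, new_vals, max_slots=5):
--     """Merge *new_vals* into *existing_vals* (list of up to *max_slots*).
--
--     Returns a new list of length *max_slots*.  Existing non-None values are
--     preserved in their original position.  New values that are not already
--     present are appended to the first empty slot.
--
--     Used for **emails** where the original primary should stay in slot 1.
--     """
--     slots = list(existing_vals) + [None] * max_slots
--     slots = slots[:max_slots]
--
--     present = {v.lower() for v in slots if v}
--     for val in new_vals:
--         if val and val.lower() not in present: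
--             for i in range(max_slots):
--                 if slots[i] is None:
--                     slots[i] = val
--                     present.add(val.lower())
--                     break
--     return slots
-- ===== SOURCE B (Python) =====
-- def _fill_slots(existing_vals, new_vals, max_slots=5):
--     """Two-pass rewrite: first select the ordered list of new values to add
--     (truthy, case-insensitively not yet present, dedup within new_vals),
--     then place them into the empty slots in a single scan."""
--     slots = (list(existing_vals) + [None] * max_slots)[:max_slots]
--     present = {v.lower() for v in slots if v}
--     to_add = []
--     for val in new_vals:
--         if val and val.lower() not in present:
--             present.add(val.lower())
--             to_add.append(val)
--     it = iter(to_add)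
--     for i in range(max_slots):
--         if slots[i] is None:
--             nxt = next(it, None)
--             if nxt is None:
--                 break
--             slots[i] = nxt
--     return slots
-- ===== Notes on version B (the rewrite author's own statement) =====
-- stated objective: alternative
-- what changed: A interleaves selection and placement, rescanning the slot list from index 0 for every accepted new value; B first selects the ordered list of values to add in one pass over new_vals (growing the present-set at selection time) and then places them into the empty slots in one single scan over range(max_slots).
import Mathlib
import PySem

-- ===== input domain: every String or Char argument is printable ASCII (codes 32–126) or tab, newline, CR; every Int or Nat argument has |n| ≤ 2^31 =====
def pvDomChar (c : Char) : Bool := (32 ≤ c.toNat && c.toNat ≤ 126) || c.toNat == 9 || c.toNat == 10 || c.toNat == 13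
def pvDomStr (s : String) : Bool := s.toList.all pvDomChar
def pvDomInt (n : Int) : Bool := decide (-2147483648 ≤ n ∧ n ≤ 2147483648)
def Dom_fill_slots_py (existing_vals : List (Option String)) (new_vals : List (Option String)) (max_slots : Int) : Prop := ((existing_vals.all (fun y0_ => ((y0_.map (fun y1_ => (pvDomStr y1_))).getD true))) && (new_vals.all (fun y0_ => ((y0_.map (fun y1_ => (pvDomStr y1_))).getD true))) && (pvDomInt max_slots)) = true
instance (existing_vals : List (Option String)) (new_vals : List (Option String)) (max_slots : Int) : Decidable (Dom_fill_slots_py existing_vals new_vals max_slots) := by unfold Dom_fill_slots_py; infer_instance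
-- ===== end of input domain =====

-- B replaces A's interleaved selection/placement (rescanning the slots from index 0 for each
-- accepted value) by one selection pass over new_vals followed by one placement scan over the slots.

-- ===== PORT A =====
-- inner 'for i in range(max_slots): if slots[i] is None: … break' loop, state (slots, present, broke)
def fillSlotsInnerA (s : String) (st : List (Option String) × PySem.Set String × Bool) (i : Int) :
    List (Option String) × PySem.Set String × Bool :=
  if st.2.2 then st
  else
    match PySem.List.pyGet? st.1 i with
    | some none => (PySem.List.pySetD st.1 i (some s), PySem.Set.add st.2.1 (PySem.Str.lower s), true)
    | _ => st

-- body of 'for val in new_vals: …', state (slots, present)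
def fillSlotsStepA (max_slots : Int) (st : List (Option String) × PySem.Set String) (val : Option String) :
    List (Option String) × PySem.Set String :=
  match val with
  | none => st
  | some s =>
    if s != "" && !(PySem.Set.contains st.2 (PySem.Str.lower s)) then
      let r := (PySem.List.pyRange 0 max_slots 1).foldl (fillSlotsInnerA s) (st.1, st.2, false)
      (r.1, r.2.1)
    else st

def fill_slots_py (existing_vals : List (Option String)) (new_vals : List (Option String)) (max_slots : Int) : List (Option String) :=
  let slots := PySem.List.slice (existing_vals ++ List.replicate max_slots.toNat (none : Option String)) none (some max_slots)
  let present := PySem.Set.ofList (slots.filterMap (fun v => v.bind (fun s => if s == "" then none else some (PySem.Str.lower s))))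
  (new_vals.foldl (fillSlotsStepA max_slots) (slots, present)).1

-- ===== PORT B =====
-- selection pass 'for val in new_vals: …', state (to_add, present)
def selectStepB (st : List String × PySem.Set String) (val : Option String) : List String × PySem.Set String :=
  match val with
  | none => st
  | some s =>
    if s != "" && !(PySem.Set.contains st.2 (PySem.Str.lower s)) then
      (st.1 ++ [s], PySem.Set.add st.2 (PySem.Str.lower s))
    else st

-- placement pass 'for i in range(max_slots): …', state (slots, iterator remainder, done/break flag)
def placeStepB (st : List (Option String) × List String × Bool) (i : Int) :
    List (Option String) × List String × Bool :=
  if st.2.2 then st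
  else
    match PySem.List.pyGet? st.1 i with
    | some none =>
      match st.2.1 with
      | [] => (st.1, [], true)
      | x :: rest => (PySem.List.pySetD st.1 i (some x), rest, false)
    | _ => st

def fill_slots_py_alt (existing_vals : List (Option String)) (new_vals : List (Option String)) (max_slots : Int) : List (Option String) :=
  let slots := PySem.List.slice (existing_vals ++ List.replicate max_slots.toNat (none : Option String)) none (some max_slots)
  let present := PySem.Set.ofList (slots.filterMap (fun v => v.bind (fun s => if s == "" then none else some (PySem.Str.lower s))))
  let toAdd := (new_vals.foldl selectStepB ([], present)).1
  ((PySem.List.pyRange 0 max_slots 1).foldl placeStepB (slots, toAdd, false)).1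

-- ===== PRECONDITION & SPEC =====
def Spec_fill_slots_py (existing_vals : List (Option String)) (new_vals : List (Option String)) (max_slots : Int) (out : List (Option String)) : Prop := out = fill_slots_py_alt existing_vals new_vals max_slots
instance (existing_vals : List (Option String)) (new_vals : List (Option String)) (max_slots : Int) (out : List (Option String)) : Decidable (Spec_fill_slots_py existing_vals new_vals max_slots out) := by unfold Spec_fill_slots_py; infer_instance

-- ===== CLAIM (what is proved, stated in full; the proofs are below) =====
def Claim_equal_fill_slots_py : Prop := ∀ (existing_vals : List (Option String)) (new_vals : List (Option String)) (max_slots : Int), Dom_fill_slots_py existing_vals new_vals max_slots → Spec_fill_slots_py existing_vals new_vals max_slots (fill_slots_py existing_vals new_vals max_slots)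

-- ===== LEMMAS AND PROOFS =====

-- a single inner-A step on a non-empty, non-broken position does nothing
theorem innerA_eq_self (s : String) (st : List (Option String) × PySem.Set String × Bool) (j : Int)
    (h : PySem.List.pyGet? st.1 j ≠ some none) : fillSlotsInnerA s st j = st := by
  unfold fillSlotsInnerA
  by_cases hd : st.2.2
  · simp [hd]
  · rcases hq : PySem.List.pyGet? st.1 j with _ | v
    · simp [hd]
    · cases v with
      | none => exact absurd hq h
      | some t => simp [hd]

theorem innerA_skip (s : String) (L : List Int) (st : List (Option String) × PySem.Set String × Bool)
    (h : ∀ j ∈ L, PySem.List.pyGet? st.1 j ≠ some none) :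
    L.foldl (fillSlotsInnerA s) st = st := by
  induction L with
  | nil => rfl
  | cons j L ih =>
    have h1 : fillSlotsInnerA s st j = st := innerA_eq_self s st j (h j (by simp))
    simp only [List.foldl_cons, h1]
    exact ih (fun k hk => h k (by simp [hk]))

theorem innerA_broke (s : String) (L : List Int) (slots : List (Option String)) (p : PySem.Set String) :
    L.foldl (fillSlotsInnerA s) (slots, p, true) = (slots, p, true) := by
  induction L with
  | nil => rfl
  | cons j L ih => simpa [fillSlotsInnerA] using ih

theorem placeB_eq_self (st : List (Option String) × List String × Bool) (j : Int)
    (h : PySem.List.pyGet? st.1 j ≠ some none) : placeStepB st j = st := by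
  unfold placeStepB
  by_cases hd : st.2.2
  · simp [hd]
  · rcases hq : PySem.List.pyGet? st.1 j with _ | v
    · simp [hd]
    · cases v with
      | none => exact absurd hq h
      | some t => simp [hd]

theorem placeB_skip (L : List Int) (st : List (Option String) × List String × Bool)
    (h : ∀ j ∈ L, PySem.List.pyGet? st.1 j ≠ some none) :
    L.foldl placeStepB st = st := by
  induction L with
  | nil => rfl
  | cons j L ih =>
    have h1 : placeStepB st j = st := placeB_eq_self st j (h j (by simp))
    simp only [List.foldl_cons, h1]
    exact ih (fun k hk => h k (by simp [hk]))

-- placing an empty iterator never changes the slots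
theorem placeB_nil (L : List Int) (slots : List (Option String)) (d : Bool) :
    (L.foldl placeStepB (slots, ([] : List String), d)).1 = slots := by
  induction L generalizing d with
  | nil => rfl
  | cons j L ih =>
    by_cases hd : d
    · subst hd; simpa [placeStepB] using ih true
    · simp only [Bool.not_eq_true] at hd; subst hd
      simp only [List.foldl_cons]
      unfold placeStepB
      rcases hq : PySem.List.pyGet? slots j with _ | v
      · simpa [hq] using ih false
      · cases v with
        | none => simpa [hq] using ih true
        | some t => simpa [hq] using ih false

-- first occurrence of none in a list
theorem exists_first_none (l : List (Option String)) (h : (none : Option String) ∈ l) :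
    ∃ i : Nat, l[i]? = some none ∧ ∀ j : Nat, j < i → l[j]? ≠ some none := by
  induction l with
  | nil => simp at h
  | cons a l ih =>
    by_cases ha : a = none
    · exact ⟨0, by simp [ha], by omega⟩
    · have h' : (none : Option String) ∈ l := by
        rcases List.mem_cons.mp h with h1 | h1
        · exact absurd h1.symm ha
        · exact h1
      obtain ⟨i, hi, hfirst⟩ := ih h'
      refine ⟨i + 1, by simpa using hi, ?_⟩
      intro j hj
      cases j with
      | zero => simpa using ha
      | succ k => simpa using hfirst k (by omega)

theorem first_none_lt_length (l : List (Option String)) (i : Nat) (hi : l[i]? = some none) :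
    i < l.length := by
  by_contra hle
  rw [List.getElem?_eq_none (by omega)] at hi
  simp at hi

-- the accumulated to_add list factors through the empty accumulator
theorem select_acc (vals : List (Option String)) (acc : List String) (p : PySem.Set String) :
    vals.foldl selectStepB (acc, p)
      = (acc ++ (vals.foldl selectStepB ([], p)).1, (vals.foldl selectStepB ([], p)).2) := by
  induction vals generalizing acc p with
  | nil => simp
  | cons val vals ih =>
    cases val with
    | none => simpa [selectStepB] using ih acc p
    | some s =>
      by_cases hc : (s != "" && !(PySem.Set.contains p (PySem.Str.lower s))) = true
      · simp only [List.foldl_cons, selectStepB, hc, if_pos, List.nil_append]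
        rw [ih (acc ++ [s]), ih [s]]
        simp
      · simp only [List.foldl_cons, selectStepB, hc, if_neg, Bool.not_eq_true]
        simp only [Bool.not_eq_true] at hc
        simp [ih acc p]

-- A's inner scan finds the first empty slot
theorem innerA_found (ms : Int) (slots : List (Option String)) (p : PySem.Set String) (s : String)
    (i : Nat) (hi : slots[i]? = some none) (hfirst : ∀ j : Nat, j < i → slots[j]? ≠ some none)
    (hms : (i : Int) < ms) :
    (PySem.List.pyRange 0 ms 1).foldl (fillSlotsInnerA s) (slots, p, false)
      = (slots.set i (some s), PySem.Set.add p (PySem.Str.lower s), true) := by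
  have hskip : (PySem.List.pyRange 0 (i : Int) 1).foldl (fillSlotsInnerA s) (slots, p, false)
      = (slots, p, false) := by
    apply innerA_skip
    intro j hj
    rw [PySem.List.mem_pyRange_one] at hj
    have hj' : j = ((j.toNat : Nat) : Int) := by omega
    rw [hj', PySem.List.pyGet?_natCast]
    exact hfirst j.toNat (by omega)
  rw [PySem.List.pyRange_one_append 0 (i : Int) ms (by omega) (by omega), List.foldl_append, hskip]
  rw [PySem.List.pyRange_one_cons hms, List.foldl_cons]
  have hstep : fillSlotsInnerA s (slots, p, false) (i : Int)
      = (slots.set i (some s), PySem.Set.add p (PySem.Str.lower s), true) := by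
    unfold fillSlotsInnerA
    simp [PySem.List.pyGet?_natCast, hi, PySem.List.pySetD_natCast]
  rw [hstep, innerA_broke]

-- B's placement consumes the head of to_add at the first empty slot
theorem placeB_found (ms : Int) (slots : List (Option String)) (x : String) (rest : List String)
    (i : Nat) (hi : slots[i]? = some none) (hfirst : ∀ j : Nat, j < i → slots[j]? ≠ some none)
    (hms : (i : Int) < ms) :
    (PySem.List.pyRange 0 ms 1).foldl placeStepB (slots, x :: rest, false)
      = (PySem.List.pyRange ((i : Int) + 1) ms 1).foldl placeStepB (slots.set i (some x), rest, false) := by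
  have hskip : (PySem.List.pyRange 0 (i : Int) 1).foldl placeStepB (slots, x :: rest, false)
      = (slots, x :: rest, false) := by
    apply placeB_skip
    intro j hj
    rw [PySem.List.mem_pyRange_one] at hj
    have hj' : j = ((j.toNat : Nat) : Int) := by omega
    rw [hj', PySem.List.pyGet?_natCast]
    exact hfirst j.toNat (by omega)
  rw [PySem.List.pyRange_one_append 0 (i : Int) ms (by omega) (by omega), List.foldl_append, hskip]
  rw [PySem.List.pyRange_one_cons hms, List.foldl_cons]
  have hstep : placeStepB (slots, x :: rest, false) (i : Int)
      = (slots.set i (some x), rest, false) := by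
    unfold placeStepB
    simp [PySem.List.pyGet?_natCast, hi, PySem.List.pySetD_natCast]
  rw [hstep]

-- restarting B's placement from 0 on the updated slots skips the filled prefix
theorem placeB_restart (ms : Int) (slots : List (Option String)) (x : String) (rest : List String)
    (i : Nat) (hi : slots[i]? = some none) (hfirst : ∀ j : Nat, j < i → slots[j]? ≠ some none)
    (hms : (i : Int) < ms) :
    (PySem.List.pyRange 0 ms 1).foldl placeStepB (slots.set i (some x), rest, false)
      = (PySem.List.pyRange ((i : Int) + 1) ms 1).foldl placeStepB (slots.set i (some x), rest, false) := by
  have hilen : i < slots.length := first_none_lt_length slots i hi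
  have hskip : (PySem.List.pyRange 0 ((i : Int) + 1) 1).foldl placeStepB (slots.set i (some x), rest, false)
      = (slots.set i (some x), rest, false) := by
    apply placeB_skip
    intro j hj
    rw [PySem.List.mem_pyRange_one] at hj
    have hj' : j = ((j.toNat : Nat) : Int) := by omega
    rw [hj', PySem.List.pyGet?_natCast]
    by_cases hji : j.toNat = i
    · rw [hji, List.getElem?_set_self hilen]
      simp
    · rw [List.getElem?_set_ne (by omega)]
      exact hfirst j.toNat (by omega)
  rw [PySem.List.pyRange_one_append 0 ((i : Int) + 1) ms (by omega) (by omega), List.foldl_append, hskip]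

-- main invariant: A's interleaved loop equals select-then-place
theorem fill_slots_main (ms : Int) (hms : 0 ≤ ms) :
    ∀ (vals : List (Option String)) (slots : List (Option String)) (p : PySem.Set String),
      slots.length = ms.toNat →
      (vals.foldl (fillSlotsStepA ms) (slots, p)).1
        = ((PySem.List.pyRange 0 ms 1).foldl placeStepB
            (slots, (vals.foldl selectStepB ([], p)).1, false)).1 := by
  intro vals
  induction vals with
  | nil =>
    intro slots p hlen
    simpa using (placeB_nil (PySem.List.pyRange 0 ms 1) slots false).symm
  | cons val vals ih =>
    intro slots p hlen
    cases val with
    | none => simpa [fillSlotsStepA, selectStepB] using ih slots p hlen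
    | some s =>
      by_cases hc : (s != "" && !(PySem.Set.contains p (PySem.Str.lower s))) = true
      · simp only [List.foldl_cons, fillSlotsStepA, selectStepB, hc, if_pos, List.nil_append]
        by_cases hn : (none : Option String) ∈ slots
        · obtain ⟨i, hi, hfirst⟩ := exists_first_none slots hn
          have hilen : i < slots.length := first_none_lt_length slots i hi
          have hims : (i : Int) < ms := by omega
          rw [innerA_found ms slots p s i hi hfirst hims]
          dsimp only
          rw [ih (slots.set i (some s)) (PySem.Set.add p (PySem.Str.lower s)) (by simpa using hlen)]
          rw [select_acc vals [s] (PySem.Set.add p (PySem.Str.lower s))]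
          dsimp only
          simp only [List.singleton_append]
          rw [placeB_found ms slots s _ i hi hfirst hims,
              placeB_restart ms slots s _ i hi hfirst hims]
        · have hfull : ∀ j ∈ PySem.List.pyRange 0 ms 1,
              PySem.List.pyGet? slots j ≠ some none := by
            intro j hj
            rw [PySem.List.mem_pyRange_one] at hj
            have hj' : j = ((j.toNat : Nat) : Int) := by omega
            rw [hj', PySem.List.pyGet?_natCast]
            intro hjn
            exact hn (List.mem_of_getElem? hjn)
          rw [innerA_skip s (PySem.List.pyRange 0 ms 1) (slots, p, false) hfull]
          dsimp only
          rw [ih slots p hlen]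
          rw [select_acc vals [s] (PySem.Set.add p (PySem.Str.lower s))]
          dsimp only
          simp only [List.singleton_append]
          rw [placeB_skip (PySem.List.pyRange 0 ms 1) _ hfull,
              placeB_skip (PySem.List.pyRange 0 ms 1) _ hfull]
      · simp only [Bool.not_eq_true] at hc
        simp only [List.foldl_cons, fillSlotsStepA, selectStepB, hc, Bool.false_eq_true, if_false]
        exact ih slots p hlen

-- for max_slots < 0 A's outer loop never changes its state
theorem stepA_id (ms : Int) (_hms : ms < 0) (st : List (Option String) × PySem.Set String)
    (val : Option String) : fillSlotsStepA ms st val = st := by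
  obtain ⟨a, b⟩ := st
  cases val with
  | none => rfl
  | some s =>
    unfold fillSlotsStepA
    rw [PySem.List.pyRange_one_eq_nil (by omega)]
    simp

theorem foldA_id (ms : Int) (hms : ms < 0) (vals : List (Option String))
    (st : List (Option String) × PySem.Set String) :
    vals.foldl (fillSlotsStepA ms) st = st := by
  induction vals with
  | nil => rfl
  | cons v vals ih => simpa [stepA_id ms hms st v] using ih

-- ===== VERDICT (by name: the statement is the Claim_ definition above) =====
theorem fill_slots_py_spec : Claim_equal_fill_slots_py := by
  unfold Claim_equal_fill_slots_py
  intro existing_vals new_vals max_slots _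
  simp only [Spec_fill_slots_py, fill_slots_py, fill_slots_py_alt]
  by_cases hms : 0 ≤ max_slots
  · apply fill_slots_main max_slots hms
    rw [PySem.List.slice_to _ hms]
    simp
  · rw [foldA_id max_slots (by omega)]
    rw [PySem.List.pyRange_one_eq_nil (by omega), List.foldl_nil]
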